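-- pv_equiv track=rewrite | github.com/jhw/lxrpy | lxr/scripts/list_card.py | format_index_ranges
-- ===== SOURCE A (Python) =====
-- def format_index_ranges(items):
--     """
--     Format list of (index, name) tuples as compact ranges.
--
--     Examples:
--         [(0, 'A'), (1, 'B'), (2, 'C')] -> "0..2"
--         [(0, 'A'), (2, 'B'), (5, 'C')] -> "0, 2, 5"
--     """
--     if not items:
--         return ""
--
--     indices = [item[0] for item in items]
--
--     ranges = []
--     start = indices[0]
--     end = indices[0]
--
--     for idx in indices[1:]:
--         if idx == end + 1:
--             end = idx
--         else:
--             if start == end: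
--                 ranges.append(f"{start:02d}")
--             else:
--                 ranges.append(f"{start:02d}..{end:02d}")
--             start = idx
--             end = idx
--
--     # Add final range
--     if start == end:
--         ranges.append(f"{start:02d}")
--     else:
--         ranges.append(f"{start:02d}..{end:02d}")
--
--     return ", ".join(ranges)
-- ===== SOURCE B (Python) =====
-- def format_index_ranges(items):
--     # Build the run list back-to-front: traverse in reverse, merging each index
--     # into the front run when it extends it by exactly one.
--     runs = []
--     for v, _ in reversed(items):
--         if runs and runs[0][0] == v + 1:
--             runs[0] = (v, runs[0][1])
--         else:
--             runs.insert(0, (v, v))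
--     return ", ".join(f"{a:02d}" if a == b else f"{a:02d}..{b:02d}" for a, b in runs)
-- ===== Notes on version B (the rewrite author's own statement) =====
-- stated objective: alternative
-- what changed: Replaces A's forward single-pass state machine (start/end accumulator, emit-on-break plus a final flush) by a backward traversal that builds the list of (first,last) runs back-to-front, merging each index into the front run when it extends it by one, then formats the run list in a separate step.
import Mathlib
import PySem

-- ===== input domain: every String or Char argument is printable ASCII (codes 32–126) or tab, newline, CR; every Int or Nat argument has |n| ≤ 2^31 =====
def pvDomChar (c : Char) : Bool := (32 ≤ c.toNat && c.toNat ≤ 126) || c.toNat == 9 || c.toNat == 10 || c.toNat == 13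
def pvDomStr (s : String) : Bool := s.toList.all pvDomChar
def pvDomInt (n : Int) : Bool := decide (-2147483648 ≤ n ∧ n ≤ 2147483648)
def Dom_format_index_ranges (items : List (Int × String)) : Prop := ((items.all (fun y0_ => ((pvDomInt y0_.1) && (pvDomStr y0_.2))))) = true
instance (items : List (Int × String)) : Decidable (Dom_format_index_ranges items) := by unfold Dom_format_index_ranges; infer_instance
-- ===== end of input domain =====

-- B builds the (first,last) run list back-to-front (reverse traversal merging into the
-- front run) instead of A's forward start/end state machine, then formats the runs.


-- f"{n:02d}" (exact for ints: zero-pad to width 2, sign in front) — shared format primitive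
def fmt02 (n : Int) : String := PySem.Str.zfill (PySem.Int.toStr n) 2

-- ===== PORT A =====
def format_index_ranges (items : List (Int × String)) : String :=
  if items = [] then ""
  else
    let indices := items.map (fun item => item.1)
    let start0 := indices.headD 0           -- indices[0] (nonempty here)
    let st := (indices.drop 1).foldl
      (fun (acc : Int × Int × List String) idx =>
        let start := acc.1; let e := acc.2.1; let ranges := acc.2.2
        if idx = e + 1 then (start, idx, ranges)
        else
          let ranges := if start = e then ranges ++ [fmt02 start]
                        else ranges ++ [fmt02 start ++ ".." ++ fmt02 e]
          (idx, idx, ranges))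
      (start0, start0, ([] : List String))
    let ranges := if st.1 = st.2.1 then st.2.2 ++ [fmt02 st.1]
                  else st.2.2 ++ [fmt02 st.1 ++ ".." ++ fmt02 st.2.1]
    PySem.Str.join ", " ranges

-- ===== PORT B =====
-- reversed(items) loop with front insertion/merge = structural recursion building the
-- run list back-to-front (the recursive call is the state after the later elements)
def buildRuns : List (Int × String) → List (Int × Int)
  | [] => []
  | it :: rest =>
    let v := it.1
    match buildRuns rest with
    | (a, b) :: rs => if a = v + 1 then (v, b) :: rs else (v, v) :: (a, b) :: rs
    | [] => [(v, v)]

def runPiece (p : Int × Int) : String :=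
  if p.1 = p.2 then fmt02 p.1 else fmt02 p.1 ++ ".." ++ fmt02 p.2

def format_index_ranges_alt (items : List (Int × String)) : String :=
  PySem.Str.join ", " ((buildRuns items).map runPiece)

-- ===== PRECONDITION & SPEC =====
def Spec_format_index_ranges (items : List (Int × String)) (out : String) : Prop := out = format_index_ranges_alt items
instance (items : List (Int × String)) (out : String) : Decidable (Spec_format_index_ranges items out) := by unfold Spec_format_index_ranges; infer_instance

-- ===== CLAIM (what is proved, stated in full; the proofs are below) =====
def Claim_equal_format_index_ranges : Prop := ∀ (items : List (Int × String)), Dom_format_index_ranges items → Spec_format_index_ranges items (format_index_ranges items)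

-- ===== LEMMAS AND PROOFS =====

-- proof-side characterisation of A's loop: the list of runs it emits
def runsOf (s e : Int) : List Int → List (Int × Int)
  | [] => [(s, e)]
  | idx :: t => if idx = e + 1 then runsOf s idx t else (s, e) :: runsOf idx idx t

-- proof-side: merge a run arriving from the left into a run list
def mergeRun (p : Int × Int) : List (Int × Int) → List (Int × Int)
  | [] => [p]
  | (a, b) :: rs => if a = p.2 + 1 then (p.1, b) :: rs else p :: (a, b) :: rs

theorem buildRuns_cons (it : Int × String) (rest : List (Int × String)) :
    buildRuns (it :: rest) = mergeRun (it.1, it.1) (buildRuns rest) := by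
  simp only [buildRuns]
  cases h : buildRuns rest with
  | nil => rfl
  | cons q rs => cases q; rfl

-- the emitted piece (loop body and final flush share this shape)
theorem flush_eq (s e : Int) (rs : List String) :
    (if s = e then rs ++ [fmt02 s] else rs ++ [fmt02 s ++ ".." ++ fmt02 e])
      = rs ++ [runPiece (s, e)] := by
  unfold runPiece; split_ifs <;> rfl

-- A's foldl followed by the final flush emits exactly the pieces of runsOf
theorem aLoop_eq (rest : List Int) : ∀ (s e : Int) (rs : List String),
    (let st := rest.foldl
      (fun (acc : Int × Int × List String) idx =>
        let start := acc.1; let e := acc.2.1; let ranges := acc.2.2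
        if idx = e + 1 then (start, idx, ranges)
        else
          let ranges := if start = e then ranges ++ [fmt02 start]
                        else ranges ++ [fmt02 start ++ ".." ++ fmt02 e]
          (idx, idx, ranges)) (s, e, rs)
     if st.1 = st.2.1 then st.2.2 ++ [fmt02 st.1]
     else st.2.2 ++ [fmt02 st.1 ++ ".." ++ fmt02 st.2.1])
    = rs ++ (runsOf s e rest).map runPiece := by
  induction rest with
  | nil =>
    intro s e rs
    simp only [List.foldl_nil, runsOf, List.map_cons, List.map_nil]
    exact flush_eq s e rs
  | cons idx t ih =>
    intro s e rs
    simp only [List.foldl_cons, runsOf]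
    by_cases h : idx = e + 1
    · simp only [h, reduceIte]
      exact ih s (e + 1) rs
    · simp only [if_neg h, flush_eq s e rs]
      rw [ih idx idx (rs ++ [runPiece (s, e)])]
      simp [List.append_assoc]

-- merging two runs from the left commutes the way A's state machine steps
theorem mergeRun_merge (s e x : Int) (R : List (Int × Int)) :
    mergeRun (s, e) (mergeRun (x, x) R)
      = if x = e + 1 then mergeRun (s, x) R else (s, e) :: mergeRun (x, x) R := by
  cases R with
  | nil => by_cases h : x = e + 1 <;> simp [mergeRun, h]
  | cons q rs =>
    rcases q with ⟨a, b⟩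
    by_cases h1 : a = x + 1
    · by_cases h2 : x = e + 1
      · subst h1; subst h2
        simp only [mergeRun, reduceIte]
      · simp only [mergeRun, h1, reduceIte, if_neg h2]
    · by_cases h2 : x = e + 1
      · subst h2
        simp only [mergeRun, if_neg h1, reduceIte]
      · simp only [mergeRun, if_neg h1, if_neg h2]

-- A's run state machine computes the same runs as B's back-to-front construction
theorem runsOf_eq_buildRuns (t : List (Int × String)) : ∀ (s e : Int),
    runsOf s e (t.map (fun it => it.1)) = mergeRun (s, e) (buildRuns t) := by
  induction t with
  | nil => intro s e; simp [runsOf, buildRuns, mergeRun]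
  | cons it t ih =>
    intro s e
    simp only [List.map_cons, runsOf, buildRuns_cons, mergeRun_merge]
    by_cases h : it.1 = e + 1
    · simp only [h, reduceIte]; exact ih s (e + 1)
    · simp only [if_neg h, ih it.1 it.1]

theorem format_index_ranges_eq_alt (items : List (Int × String)) :
    format_index_ranges items = format_index_ranges_alt items := by
  cases items with
  | nil => simp [format_index_ranges, format_index_ranges_alt, buildRuns, PySem.Str.join]
  | cons p ps =>
    simp only [format_index_ranges, format_index_ranges_alt, if_neg (List.cons_ne_nil p ps)]
    simp only [List.map_cons, List.headD_cons, List.drop_succ_cons, List.drop_zero]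
    rw [aLoop_eq (ps.map (fun it => it.1)) p.1 p.1 [], List.nil_append,
      runsOf_eq_buildRuns, ← buildRuns_cons]

-- ===== VERDICT (by name: the statement is the Claim_ definition above) =====
theorem format_index_ranges_spec : Claim_equal_format_index_ranges := by
  intro items _
  exact format_index_ranges_eq_alt items
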